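-- pv_equiv track=rewrite | github.com/jahirulislammolla/CodeFights | Fights/kStepMaximization.py | kStepMaximization
-- ===== SOURCE A (Python) =====
-- from itertools import permutations
--
-- def kStepMaximization(n, k):
--     x=[n]
--     p=0
--     while p<k:
--         for i in permutations([1,2,3]):
--             y=[]
--             p+=1
--             for t in x:
--                 c=t
--                 for j in i:
--                     if j==1:
--                         e=one(c)
--                     elif j==2:
--                         e=two(c)
--                     else:
--                         e=three(c)
--                     y.append(e)
--             x=y
--             if p==k:
--                 return max(x)
--
-- def one(n):
--     return n+1
--
-- def two(n):
--     a=list(str(n))[::-1]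
--     c=''
--     for i in a:
--         if i not in "347":
--             if i =="6":
--                 c+="9"
--             elif i=="9":
--                 c+="6"
--             else:
--                 c+=i
--     if len(c)==len(a):
--         n=int(c)
--     return n
--
-- def three(n):
--     return n*2
-- ===== SOURCE B (Python) =====
-- _TR = str.maketrans("69", "96", "347")
--
-- def _rev(v):
--     s = str(v)[::-1]
--     t = s.translate(_TR)
--     return int(t) if len(t) == len(s) else v
--
-- def kStepMaximization(n, k):
--     if k < 1:
--         return None
--     best = None
--     stack = [(n, k)]
--     while stack:
--         v, d = stack.pop()
--         if d == 0:
--             if best is None or v > best: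
--                 best = v
--         else:
--             stack.append((v + 1, d - 1))
--             stack.append((_rev(v), d - 1))
--             stack.append((v * 2, d - 1))
--     return best
-- ===== Notes on version B (the rewrite author's own statement) =====
-- stated objective: alternative
-- what changed: Replaces A's iterative level-by-level list building (cycling through all 6 permutations of the three ops, materialising 3^k-element lists, then max of the final list) with a direct recursive DFS f(v,d)=max of f over the three operations, applied once per step; no lists and no permutation machinery.
-- outside the precondition, e.g. on kStepMaximization(5, 0): A returns None, B returns None; on kStepMaximization(-37, 1): A returns -36, B returns -36
import Mathlib
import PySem

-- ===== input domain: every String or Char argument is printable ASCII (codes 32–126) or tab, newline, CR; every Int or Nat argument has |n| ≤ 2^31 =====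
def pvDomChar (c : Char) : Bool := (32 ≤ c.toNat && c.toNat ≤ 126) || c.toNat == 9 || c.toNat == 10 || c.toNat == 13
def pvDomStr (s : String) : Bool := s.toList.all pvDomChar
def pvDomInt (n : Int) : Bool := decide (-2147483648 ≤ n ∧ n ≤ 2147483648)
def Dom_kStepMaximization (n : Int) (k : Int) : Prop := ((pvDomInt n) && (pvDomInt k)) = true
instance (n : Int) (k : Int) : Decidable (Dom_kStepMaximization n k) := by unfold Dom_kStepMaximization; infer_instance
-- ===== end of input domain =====

-- B replaces A's iterative level-by-level list building (cycling through the 6 permutations of the ops)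
-- with a direct recursive DFS taking the max over the three operations at each step (alternative decomposition).


-- ===== PORT A =====
def pyOne (n : Int) : Int := n + 1

-- two(n): reverse digits of str(n), drop '3','4','7', swap 6<->9; int(c) when no digit was dropped.
-- int(c) → ofChars?; '.getD n' stands in where Python raises ValueError (negative n, excluded by Pre_).
def pyTwo (n : Int) : Int :=
  let a := (PySem.Int.toChars n).reverse
  let c := a.foldl (fun (c : List Char) (i : Char) =>
      if ¬ (['3', '4', '7'].contains i) then
        (if i == '6' then c ++ ['9'] else if i == '9' then c ++ ['6'] else c ++ [i])
      else c) []
  if c.length == a.length then (PySem.Int.ofChars? c).getD n else n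

def pyThree (n : Int) : Int := n * 2

def applyOpA (j : Int) (c : Int) : Int :=
  if j == 1 then pyOne c else if j == 2 then pyTwo c else pyThree c

-- the body "y=[]; for t in x: c=t; for j in i: … y.append(e)"
def stepPerm (i : List Int) (x : List Int) : List Int :=
  x.foldl (fun y t => let c := t; i.foldl (fun y j => y ++ [applyOpA j c]) y) []

-- "for i in permutations([1,2,3]): p+=1; x=step; if p==k: return max(x)"
def loopPerms (k : Int) : List (List Int) → List Int → Int → (List Int × Int) ⊕ Int
  | [], x, p => Sum.inl (x, p)
  | i :: rest, x, p =>
    let y := stepPerm i x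
    let p := p + 1
    if p == k then Sum.inr ((PySem.List.max? y (fun v => v)).getD 0)
    else loopPerms k rest y p

-- "while p<k: …"; fuel k.toNat+1 is ample (p grows by 6 each pass); exhaustion/fall-through yield 0 (outside Pre_)
def whileA (k : Int) : Nat → List Int → Int → Int
  | 0, _, _ => 0
  | fuel + 1, x, p =>
    if p < k then
      match loopPerms k (PySem.List.permutations [1, 2, 3] 3) x p with
      | Sum.inr r => r
      | Sum.inl (x', p') => whileA k fuel x' p'
    else 0

def kStepMaximization (n : Int) (k : Int) : Int := whileA k (k.toNat + 1) [n] 0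

-- ===== PORT B =====
-- _rev(v): reverse, translate (drop 347, swap 6/9), int if nothing dropped; translate → filterMap
def pyRev (v : Int) : Int :=
  let s := (PySem.Int.toChars v).reverse
  let t := s.filterMap (fun ch =>
      if ['3', '4', '7'].contains ch then none
      else some (if ch == '6' then '9' else if ch == '9' then '6' else ch))
  if t.length == s.length then (PySem.Int.ofChars? t).getD v else v

-- explicit-stack DFS: "while stack: v,d = stack.pop(); …" (stack top = list head; pushes reversed)
def stackLoop : List (Int × Nat) → Option Int → Option Int
  | [], best => best
  | (v, 0) :: rest, best =>
    stackLoop rest (some (match best with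
      | none => v
      | some b => if v > b then v else b))
  | (v, d + 1) :: rest, best =>
    stackLoop ((v * 2, d) :: (pyRev v, d) :: (v + 1, d) :: rest) best
termination_by st _ => (st.map (fun p => 4 ^ p.2)).sum
decreasing_by
  · simp only [List.map_cons, List.sum_cons]
    omega
  · simp only [List.map_cons, List.sum_cons]
    have hp : 0 < (4 : Nat) ^ d := pow_pos (by norm_num) d
    omega

-- B returns None for k<1 (outside Pre_); 0 stands in for None here
def kStepMaximization_alt (n : Int) (k : Int) : Int :=
  if k < 1 then 0 else (stackLoop [(n, k.toNat)] none).getD 0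

-- ===== PRECONDITION & SPEC =====
-- Pre_ excludes k < 1, where A falls through returning None (no Int value), and n < 0, where A's
-- digit-reversal helper raises ValueError on most reachable values (int of a string ending in '-');
-- on the negative inputs where A happens to return, B returns the same value (see cites).
def Pre_kStepMaximization (n : Int) (k : Int) : Prop := 1 ≤ k ∧ 0 ≤ n
instance (n : Int) (k : Int) : Decidable (Pre_kStepMaximization n k) := by
  unfold Pre_kStepMaximization; infer_instance

def pvWitness_kStepMaximization : Int × Int := (5, 2)

def Spec_kStepMaximization (n : Int) (k : Int) (out : Int) : Prop := out = kStepMaximization_alt n k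
instance (n : Int) (k : Int) (out : Int) : Decidable (Spec_kStepMaximization n k out) := by
  unfold Spec_kStepMaximization; infer_instance

-- ===== CLAIM (what is proved, stated in full; the proofs are below) =====
def Claim_equal_kStepMaximization : Prop := ∀ (n : Int) (k : Int), Dom_kStepMaximization n k → Pre_kStepMaximization n k → Spec_kStepMaximization n k (kStepMaximization n k)

-- ===== LEMMAS AND PROOFS =====

-- A's helper two equals B's helper _rev (the char-appending foldl is the filterMap)
theorem foldl_filter_swap :
    ∀ (l c0 : List Char),
      l.foldl (fun (c : List Char) (i : Char) =>
        if ¬ (['3', '4', '7'].contains i) then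
          (if i == '6' then c ++ ['9'] else if i == '9' then c ++ ['6'] else c ++ [i])
        else c) c0 = c0 ++ l.filterMap (fun ch =>
          if ['3', '4', '7'].contains ch then none
          else some (if ch == '6' then '9' else if ch == '9' then '6' else ch)) := by
  intro l
  induction l with
  | nil => simp
  | cons h t ih =>
    intro c0
    rw [List.foldl_cons, List.filterMap_cons]
    by_cases hm : (['3', '4', '7'].contains h) = true
    · rw [if_pos hm, if_neg (not_not_intro hm)]
      exact ih c0
    · rw [if_neg hm, if_pos hm]
      by_cases h6 : (h == '6') = true
      · rw [if_pos h6, if_pos h6, ih]; simp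
      · rw [if_neg h6, if_neg h6]
        by_cases h9 : (h == '9') = true
        · rw [if_pos h9, if_pos h9, ih]; simp
        · rw [if_neg h9, if_neg h9, ih]; simp

theorem pyTwo_eq_pyRev (v : Int) : pyTwo v = pyRev v := by
  unfold pyTwo pyRev
  simp only [foldl_filter_swap, List.nil_append]

-- proof-side value of the DFS: the maximum reachable value in d steps
def best (v : Int) : Nat → Int
  | 0 => v
  | d + 1 => max (best (v + 1) d) (max (best (pyRev v) d) (best (v * 2) d))

-- maximum of a nonempty list (0 is a junk default for [])
def mx : List Int → Int
  | [] => 0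
  | h :: t => t.foldl max h

theorem max?_getD_eq_mx (y : List Int) (hy : y ≠ []) :
    (PySem.List.max? y (fun v => v)).getD 0 = mx y := by
  cases y with
  | nil => exact absurd rfl hy
  | cons h t => rw [PySem.List.max?_id_cons]; rfl

theorem mx_cons (v : Int) (l : List Int) (hl : l ≠ []) : mx (v :: l) = max v (mx l) := by
  cases l with
  | nil => exact absurd rfl hl
  | cons h t =>
    show List.foldl max v (h :: t) = _
    rw [List.foldl_cons, List.foldl_assoc]
    rfl

theorem mx_append (s t : List Int) (hs : s ≠ []) (ht : t ≠ []) :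
    mx (s ++ t) = max (mx s) (mx t) := by
  cases s with
  | nil => exact absurd rfl hs
  | cons a s =>
    cases t with
    | nil => exact absurd rfl ht
    | cons b t =>
      show List.foldl max a (s ++ (b :: t)) = _
      rw [List.foldl_append, List.foldl_cons, List.foldl_assoc]
      rfl

-- mx over a flatMap with nonempty chunks is mx of the chunk maxima
theorem mx_flatMap (g : Int → List Int) (hg : ∀ t, g t ≠ []) :
    ∀ (x : List Int), x ≠ [] → mx (x.flatMap g) = mx (x.map (fun t => mx (g t))) := by
  intro x
  induction x with
  | nil => intro h; exact absurd rfl h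
  | cons a x ih =>
    intro _
    cases x with
    | nil => simp [mx]
    | cons b x =>
      have hne : ((b :: x).flatMap g) ≠ [] := by
        simp only [List.flatMap_cons]
        intro hc
        exact hg b (List.append_eq_nil_iff.mp hc).1
      have h2 : (b :: x) ≠ [] := by simp
      rw [List.flatMap_cons, mx_append _ _ (hg a) hne, ih h2]
      conv_rhs => rw [List.map_cons]
      rw [mx_cons (mx (g a)) ((b :: x).map (fun t => mx (g t))) (by simp)]

-- the literal double foldl is a flatMap
theorem stepPerm_eq (i x : List Int) :
    stepPerm i x = x.flatMap (fun t => i.map (fun j => applyOpA j t)) := by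
  unfold stepPerm
  have h : ∀ (t : Int) (y : List Int),
      i.foldl (fun y j => y ++ [applyOpA j t]) y = y ++ i.map (fun j => applyOpA j t) := by
    intro t y
    exact PySem.List.foldl_append_singleton_eq_map (fun j => applyOpA j t) i y
  calc x.foldl (fun y t => i.foldl (fun y j => y ++ [applyOpA j t]) y) []
      = x.foldl (fun y t => y ++ i.map (fun j => applyOpA j t)) [] := by
        simp only [h]
    _ = [] ++ x.flatMap (fun t => i.map (fun j => applyOpA j t)) :=
        PySem.List.foldl_append_eq_flatMap (fun t => i.map (fun j => applyOpA j t)) x []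
    _ = _ := by simp

theorem perms6_eq : PySem.List.permutations ([1, 2, 3] : List Int) 3 =
    [[1, 2, 3], [1, 3, 2], [2, 1, 3], [2, 3, 1], [3, 1, 2], [3, 2, 1]] := by decide

theorem mem_perms6_ne_nil (i : List Int)
    (hi : i ∈ PySem.List.permutations ([1, 2, 3] : List Int) 3) : i ≠ [] := by
  rw [perms6_eq] at hi
  fin_cases hi <;> simp

-- for each of the 6 permutations, the chunk maximum equals one step of best
theorem chunk_best (i : List Int) (hi : i ∈ PySem.List.permutations ([1, 2, 3] : List Int) 3)
    (t : Int) (d : Nat) :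
    mx ((i.map (fun j => applyOpA j t)).map (fun v => best v d)) = best t (d + 1) := by
  have e1 : applyOpA 1 t = t + 1 := rfl
  have e2 : applyOpA 2 t = pyRev t := pyTwo_eq_pyRev t
  have e3 : applyOpA 3 t = t * 2 := rfl
  rw [perms6_eq] at hi
  fin_cases hi <;>
  · simp only [List.map_cons, List.map_nil, e1, e2, e3, mx, List.foldl, best]
    ac_rfl

theorem stepPerm_ne_nil (i : List Int)
    (hi : i ∈ PySem.List.permutations ([1, 2, 3] : List Int) 3)
    (x : List Int) (hx : x ≠ []) : stepPerm i x ≠ [] := by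
  rw [stepPerm_eq]
  cases x with
  | nil => exact absurd rfl hx
  | cons a x =>
    simp only [List.flatMap_cons]
    intro hc
    have := (List.append_eq_nil_iff.mp hc).1
    rw [List.map_eq_nil_iff] at this
    exact mem_perms6_ne_nil i hi this

-- main per-step lemma: applying one permutation layer advances best by one step
theorem step_best (i : List Int) (hi : i ∈ PySem.List.permutations ([1, 2, 3] : List Int) 3)
    (x : List Int) (hx : x ≠ []) (d : Nat) :
    mx ((stepPerm i x).map (fun v => best v d)) = mx (x.map (fun v => best v (d + 1))) := by
  rw [stepPerm_eq, List.map_flatMap,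
    mx_flatMap _ (by
      intro t
      simp only [ne_eq, List.map_eq_nil_iff]
      exact mem_perms6_ne_nil i hi) x hx]
  congr 1
  refine List.map_congr_left (fun t _ => ?_)
  exact chunk_best i hi t d

theorem loopPerms_ret (k : Int) : ∀ (perms : List (List Int)) (x : List Int) (p : Int),
    (∀ i ∈ perms, i ∈ PySem.List.permutations ([1, 2, 3] : List Int) 3) → x ≠ [] →
    p < k → k ≤ p + perms.length →
    loopPerms k perms x p = Sum.inr (mx (x.map (fun v => best v (k - p).toNat))) := by
  intro perms
  induction perms with
  | nil => intro x p _ _ h1 h2; simp at h2; omega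
  | cons i rest ih =>
    intro x p hmem hx h1 h2
    have hi : i ∈ PySem.List.permutations ([1, 2, 3] : List Int) 3 := hmem i (by simp)
    have hll : (((i :: rest).length : Nat) : Int) = (rest.length : Int) + 1 := by
      push_cast [List.length_cons]; ring
    rw [hll] at h2
    by_cases hk : (p + 1 == k) = true
    · have hk' : p + 1 = k := by simpa using hk
      simp only [loopPerms, hk, if_pos]
      congr 1
      rw [max?_getD_eq_mx _ (stepPerm_ne_nil i hi x hx)]
      have h0 : (stepPerm i x).map (fun v => best v 0) = stepPerm i x := by
        simp [best]
      have hs := step_best i hi x hx 0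
      rw [h0] at hs
      rw [hs]
      have hkp : (k - p).toNat = 0 + 1 := by omega
      rw [hkp]
    · have hk' : p + 1 ≠ k := by simpa using hk
      simp only [loopPerms, hk, Bool.false_eq_true, if_neg, not_false_iff]
      have h1' : p + 1 < k := by omega
      have h2' : k ≤ (p + 1) + rest.length := by omega
      rw [ih (stepPerm i x) (p + 1) (fun j hj => hmem j (by simp [hj]))
        (stepPerm_ne_nil i hi x hx) h1' h2']
      congr 1
      rw [step_best i hi x hx (k - (p + 1)).toNat]
      have hkp : (k - p).toNat = (k - (p + 1)).toNat + 1 := by omega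
      rw [hkp]

theorem loopPerms_cont (k : Int) : ∀ (perms : List (List Int)) (x : List Int) (p : Int),
    (∀ i ∈ perms, i ∈ PySem.List.permutations ([1, 2, 3] : List Int) 3) → x ≠ [] →
    p + perms.length < k →
    ∃ x', loopPerms k perms x p = Sum.inl (x', p + perms.length) ∧ x' ≠ [] ∧
      ∀ d : Nat, mx (x'.map (fun v => best v d)) = mx (x.map (fun v => best v (d + perms.length))) := by
  intro perms
  induction perms with
  | nil => intro x p _ hx _; exact ⟨x, by simp [loopPerms], hx, fun d => by simp⟩
  | cons i rest ih =>
    intro x p hmem hx hlt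
    have hi : i ∈ PySem.List.permutations ([1, 2, 3] : List Int) 3 := hmem i (by simp)
    have hll : (((i :: rest).length : Nat) : Int) = (rest.length : Int) + 1 := by
      push_cast [List.length_cons]; ring
    rw [hll] at hlt
    have hk : (p + 1 == k) = false := by
      simp only [beq_eq_false_iff_ne, ne_eq]; omega
    have hlt' : (p + 1) + rest.length < k := by omega
    obtain ⟨x', heq, hx', hmx⟩ := ih (stepPerm i x) (p + 1)
      (fun j hj => hmem j (by simp [hj])) (stepPerm_ne_nil i hi x hx) hlt'
    refine ⟨x', ?_, hx', ?_⟩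
    · simp only [loopPerms, hk, Bool.false_eq_true, if_neg, not_false_iff]
      rw [heq]
      congr 2
      rw [hll]
      ring
    · intro d
      rw [hmx d, step_best i hi x hx (d + rest.length)]
      rfl

theorem whileA_spec (k : Int) : ∀ (fuel : Nat) (x : List Int) (p : Int), x ≠ [] →
    p < k → k ≤ p + 6 * fuel →
    whileA k fuel x p = mx (x.map (fun v => best v (k - p).toNat)) := by
  intro fuel
  induction fuel with
  | zero => intro x p _ h1 h2; simp at h2; omega
  | succ fuel ih =>
    intro x p hx h1 h2
    rw [whileA, if_pos h1]
    have hlenN : (PySem.List.permutations ([1, 2, 3] : List Int) 3).length = 6 := by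
      rw [perms6_eq]; rfl
    have hlen : (((PySem.List.permutations ([1, 2, 3] : List Int) 3).length : Nat) : Int) = 6 := by
      rw [hlenN]; rfl
    by_cases hk : k ≤ p + 6
    · rw [loopPerms_ret k _ x p (fun j hj => hj) hx h1 (by rw [hlen]; omega)]
    · obtain ⟨x', heq, hx', hmx⟩ := loopPerms_cont k _ x p (fun j hj => hj) hx
        (by rw [hlen]; omega)
      simp only [hlenN] at heq hmx
      rw [heq]
      show whileA k fuel x' (p + ((6 : Nat) : Int)) = mx (x.map (fun v => best v (k - p).toNat))
      have hc : p + ((6 : Nat) : Int) = p + 6 := by norm_num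
      rw [hc, ih x' (p + 6) hx' (by omega) (by push_cast at h2 ⊢; omega),
        hmx (k - (p + 6)).toNat]
      have hn : (k - (p + 6)).toNat + 6 = (k - p).toNat := by omega
      rw [hn]

-- the running "best" update is a max
theorem combine_max (b x : Int) : (if x > b then x else b) = max b x := by
  rw [max_def]; split_ifs <;> omega

-- the stack DFS computes the fold of best over the stack
theorem stackLoop_spec : ∀ (st : List (Int × Nat)) (b : Option Int),
    stackLoop st b = st.foldl (fun o p => some (match o with
      | none => best p.1 p.2
      | some c => if best p.1 p.2 > c then best p.1 p.2 else c)) b := by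
  intro st b
  induction st, b using stackLoop.induct with
  | case1 b => rw [stackLoop.eq_1, List.foldl_nil]
  | case2 v rest b ih =>
    cases b with
    | none => rw [stackLoop.eq_2, List.foldl_cons]; exact ih
    | some c => rw [stackLoop.eq_3, List.foldl_cons]; exact ih
  | case3 v d rest b ih =>
    rw [stackLoop.eq_4, ih]
    simp only [List.foldl_cons]
    congr 1
    have hb : best v (d + 1) = max (best (v + 1) d) (max (best (pyRev v) d) (best (v * 2) d)) :=
      rfl
    cases b with
    | none =>
      show some (if best (v + 1) d > _ then _ else _) = some _
      simp only [combine_max, hb]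
      congr 1
      ac_rfl
    | some c =>
      show some (if best (v + 1) d > _ then _ else _) = some _
      simp only [combine_max, hb]
      congr 1
      ac_rfl

theorem alt_eq_best (n : Int) (k : Int) (hk : 1 ≤ k) :
    kStepMaximization_alt n k = best n k.toNat := by
  unfold kStepMaximization_alt
  rw [if_neg (by omega), stackLoop_spec]
  rfl

-- ===== VERDICT (by name: the statement is the Claim_ definition above) =====
theorem kStepMaximization_spec : Claim_equal_kStepMaximization := by
  intro n k _ hpre
  have hk : 1 ≤ k := hpre.1
  show kStepMaximization n k = kStepMaximization_alt n k
  rw [alt_eq_best n k hk]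
  unfold kStepMaximization
  rw [whileA_spec k (k.toNat + 1) [n] 0 (by simp) (by omega) (by omega)]
  simp [mx]
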